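-- pv_equiv track=rewrite | github.com/Syntneon/ls1_python | lesson_3.py | value_of_the_same_key_kinds
-- ===== SOURCE A (Python) =====
-- def value_of_the_same_key_kinds(monthly_sales: dict) -> dict:
--     """
--         Просуммировать словарь по годам
--     """
--
--     value_years_dict = {}
--     currency_year = ''
--
--     for key, value in monthly_sales.items():
--
--         currency_year = key.split('_')[1]
--
--         if currency_year in value_years_dict:
--             value_years_dict[currency_year] += value
--         else:
--             value_years_dict[currency_year] = value
--
--     return value_years_dict
-- ===== SOURCE B (Python) =====
-- def value_of_the_same_key_kinds(monthly_sales: dict) -> dict: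
--     """
--         Просуммировать словарь по годам
--     """
--     items = list(monthly_sales.items())
--     years = [k.split('_')[1] for k, _ in items]
--     return {y: sum(v for k, v in items if k.split('_')[1] == y)
--             for y in dict.fromkeys(years)}
-- ===== Notes on version B (the rewrite author's own statement) =====
-- stated objective: alternative
-- what changed: Replaces A's incremental accumulate-into-a-dict scan by a two-phase pass: first collect the distinct years in first-occurrence order (dict.fromkeys), then build each entry with a sum() comprehension over the items of that year.
import Mathlib
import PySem

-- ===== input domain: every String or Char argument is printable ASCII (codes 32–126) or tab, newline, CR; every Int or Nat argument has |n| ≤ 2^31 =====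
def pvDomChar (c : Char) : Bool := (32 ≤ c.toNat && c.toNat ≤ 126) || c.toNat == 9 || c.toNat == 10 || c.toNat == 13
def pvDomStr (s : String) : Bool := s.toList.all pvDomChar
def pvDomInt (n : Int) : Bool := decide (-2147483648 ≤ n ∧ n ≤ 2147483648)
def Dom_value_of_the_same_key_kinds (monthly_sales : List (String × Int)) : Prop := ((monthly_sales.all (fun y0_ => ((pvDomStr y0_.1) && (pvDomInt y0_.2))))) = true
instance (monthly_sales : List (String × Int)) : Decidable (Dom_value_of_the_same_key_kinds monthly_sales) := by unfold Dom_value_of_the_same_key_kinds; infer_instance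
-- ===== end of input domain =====

-- B replaces A's incremental dict-accumulation scan by collecting the distinct years first
-- and then summing each year's values with a per-year filter pass (alternative decomposition, not faster).


-- ===== PORT A =====
-- key.split('_')[1]: split? is total here (the separator "_" is nonempty), and the [1] lookup
-- raises IndexError when the key has no '_' — Pre_ excludes exactly those inputs, so the
-- '.getD' defaults below are never reached inside Pre_.
def pvYear (key : String) : String :=
  (PySem.List.pyGet? ((PySem.Str.split? key "_").getD []) 1).getD ""

def value_of_the_same_key_kinds (monthly_sales : List (String × Int)) : List (String × Int) :=
  (monthly_sales.foldl
    (fun (value_years_dict : PySem.Dict String Int) kv =>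
      let currency_year := pvYear kv.1
      if value_years_dict.contains currency_year then
        value_years_dict.modify currency_year 0 (· + kv.2)   -- value_years_dict[y] += value
      else
        value_years_dict.insert currency_year kv.2)          -- value_years_dict[y] = value
    PySem.Dict.empty).items

-- ===== PORT B =====
-- sum(v for k, v in items if k.split('_')[1] == y)
def pvSumYear (y : String) (items : List (String × Int)) : Int :=
  ((items.filter (fun kv => pvYear kv.1 == y)).map Prod.snd).sum

def value_of_the_same_key_kinds_alt (monthly_sales : List (String × Int)) : List (String × Int) :=
  let years := monthly_sales.map (fun kv => pvYear kv.1)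
  (PySem.List.dedup years).map (fun y => (y, pvSumYear y monthly_sales))

-- ===== PRECONDITION & SPEC =====
-- Pre_ excludes exactly the inputs where some key contains no '_': there key.split('_')[1]
-- raises IndexError in A (and in B alike).
def Pre_value_of_the_same_key_kinds (monthly_sales : List (String × Int)) : Prop :=
  ∀ kv ∈ monthly_sales, 2 ≤ ((PySem.Str.split? kv.1 "_").getD []).length
instance (monthly_sales : List (String × Int)) : Decidable (Pre_value_of_the_same_key_kinds monthly_sales) := by unfold Pre_value_of_the_same_key_kinds; infer_instance

def pvWitness_value_of_the_same_key_kinds : (List (String × Int)) :=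
  [("jan_2021", 100), ("feb_2021", 50), ("jan_2022", 7)]

def Spec_value_of_the_same_key_kinds (monthly_sales : List (String × Int)) (out : List (String × Int)) : Prop := out = value_of_the_same_key_kinds_alt monthly_sales
instance (monthly_sales : List (String × Int)) (out : List (String × Int)) : Decidable (Spec_value_of_the_same_key_kinds monthly_sales out) := by unfold Spec_value_of_the_same_key_kinds; infer_instance

-- ===== CLAIM (what is proved, stated in full; the proofs are below) =====
def Claim_equal_value_of_the_same_key_kinds : Prop := ∀ (monthly_sales : List (String × Int)), Dom_value_of_the_same_key_kinds monthly_sales → Pre_value_of_the_same_key_kinds monthly_sales → Spec_value_of_the_same_key_kinds monthly_sales (value_of_the_same_key_kinds monthly_sales)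

-- ===== LEMMAS AND PROOFS =====

-- A's loop step, named for the lemmas below (definitionally the lambda in the port of A).
def pvStep (d : PySem.Dict String Int) (kv : String × Int) : PySem.Dict String Int :=
  let y := pvYear kv.1
  if d.contains y then d.modify y 0 (· + kv.2) else d.insert y kv.2

lemma pvKeysLemma (l : List (String × Int)) (d : PySem.Dict String Int) :
    (l.foldl pvStep d).keys = PySem.Set.update d.keys (l.map (fun kv => pvYear kv.1)) := by
  induction l generalizing d with
  | nil => simp [PySem.Set.update]
  | cons kv rest ih =>
    simp only [List.foldl_cons, List.map_cons, PySem.Set.update_cons, ih]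
    congr 1
    by_cases h : d.contains (pvYear kv.1)
    · have hmem : pvYear kv.1 ∈ d.keys := (PySem.Dict.contains_iff_mem_keys d _).mp h
      simp only [pvStep, if_pos h]
      rw [PySem.Dict.keys_modify, PySem.Dict.keys_insert_of_contains d _ h,
        PySem.Set.add_of_mem hmem]
    · have hf : d.contains (pvYear kv.1) = false := by simpa using h
      have hm : pvYear kv.1 ∉ d.keys := fun hmem =>
        h ((PySem.Dict.contains_iff_mem_keys d _).mpr hmem)
      simp only [pvStep, if_neg h]
      rw [PySem.Dict.keys_insert_of_not_contains d _ hf, PySem.Set.add_of_not_mem hm]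

lemma pvNodupLemma (l : List (String × Int)) (d : PySem.Dict String Int)
    (h : d.keys.Nodup) : (l.foldl pvStep d).keys.Nodup := by
  induction l generalizing d with
  | nil => exact h
  | cons kv rest ih =>
    simp only [List.foldl_cons]
    apply ih
    by_cases hc : d.contains (pvYear kv.1)
    · simpa only [pvStep, if_pos hc, PySem.Dict.keys_modify,
        PySem.Dict.keys_insert_of_contains d _ hc] using h
    · have hf : d.contains (pvYear kv.1) = false := by simpa using hc
      rw [show pvStep d kv = d.insert (pvYear kv.1) kv.2 from by simp [pvStep, hc],
        PySem.Dict.keys_insert_of_not_contains d _ hf]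
      refine List.Nodup.append h (List.nodup_singleton _) ?_
      intro x hx hy
      simp only [List.mem_singleton] at hy
      subst hy
      exact hc ((PySem.Dict.contains_iff_mem_keys d _).mpr hx)

lemma pvGetDLemma (l : List (String × Int)) (d : PySem.Dict String Int) (y : String) :
    (l.foldl pvStep d).getD y 0 = d.getD y 0 + pvSumYear y l := by
  induction l generalizing d with
  | nil => simp [pvSumYear]
  | cons kv rest ih =>
    have hsum : pvSumYear y (kv :: rest) =
        (if pvYear kv.1 == y then kv.2 else 0) + pvSumYear y rest := by
      simp only [pvSumYear, List.filter_cons]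
      split <;> simp
    simp only [List.foldl_cons, ih, hsum]
    by_cases hy : y = pvYear kv.1
    · subst hy
      by_cases h : d.contains (pvYear kv.1)
      · rw [show pvStep d kv = d.modify (pvYear kv.1) 0 (· + kv.2) from by simp [pvStep, h],
          PySem.Dict.getD_modify]
        simp; ring
      · have hf : d.contains (pvYear kv.1) = false := by simpa using h
        rw [show pvStep d kv = d.insert (pvYear kv.1) kv.2 from by simp [pvStep, h],
          PySem.Dict.getD_insert, PySem.Dict.getD_of_not_contains d 0 hf]
        simp
    · have hb : (pvYear kv.1 == y) = false := by
        simp; exact fun hh => hy hh.symm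
      have hgd : (pvStep d kv).getD y 0 = d.getD y 0 := by
        by_cases h : d.contains (pvYear kv.1)
        · rw [show pvStep d kv = d.modify (pvYear kv.1) 0 (· + kv.2) from by simp [pvStep, h],
            PySem.Dict.getD_modify, if_neg hy]
        · rw [show pvStep d kv = d.insert (pvYear kv.1) kv.2 from by simp [pvStep, h],
            PySem.Dict.getD_insert, if_neg hy]
      rw [hgd]
      simp [hb]

-- ===== VERDICT (by name: the statement is the Claim_ definition above) =====
theorem value_of_the_same_key_kinds_spec : Claim_equal_value_of_the_same_key_kinds := by
  intro ms _ _
  unfold Spec_value_of_the_same_key_kinds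
  have hport : value_of_the_same_key_kinds ms =
      (ms.foldl pvStep (PySem.Dict.empty : PySem.Dict String Int)).items := rfl
  have hnd : (ms.foldl pvStep (PySem.Dict.empty : PySem.Dict String Int)).keys.Nodup :=
    pvNodupLemma ms _ (by rw [PySem.Dict.keys_empty]; exact List.nodup_nil)
  have hkeys : (ms.foldl pvStep (PySem.Dict.empty : PySem.Dict String Int)).keys =
      PySem.List.dedup (ms.map (fun kv => pvYear kv.1)) := by
    rw [pvKeysLemma, PySem.Dict.keys_empty, PySem.Set.update_nil_left,
      PySem.List.dedup_eq_ofList]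
  rw [hport, PySem.Dict.items_eq_map_keys _ hnd 0, hkeys]
  show _ = value_of_the_same_key_kinds_alt ms
  unfold value_of_the_same_key_kinds_alt
  apply List.map_congr_left
  intro y _
  rw [pvGetDLemma ms _ y, PySem.Dict.getD_empty]
  simp
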